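-- pv_equiv track=rewrite | github.com/bj0/aoc | 2017/d17.py | part2
-- ===== SOURCE A (Python) =====
-- def part2(input, N=2018):
--     skip = int(input.strip())
--
--     # buffer = [0]
--     pos = 0
--     insertions = [0]
--     for step in range(1, N + 1):
--         pos = ((pos + skip) % step) + 1
--         # buffer.insert(pos, step)
--         insertions.append(pos)
--
--     for step in range(N, 0, -1):
--         if insertions[step] == 1:
--             return step
--
--     raise Exception("no insertion at 1??")
-- ===== SOURCE B (Python) =====
-- def part2(input, N=2018):
--     jump = int(input.strip()) + 1
--     q = -1          # zero-based offset: q == pos - 1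
--     result = None
--     step = 1
--     while step <= N:
--         q = (q + jump) % step
--         if q == 0:
--             result = step
--         step += 1
--     if result is None:
--         raise Exception("no insertion at 1??")
--     return result
-- ===== Notes on version B (the rewrite author's own statement) =====
-- stated objective: simpler
-- what changed: B drops A's insertions table and backward scan entirely: one forward while-loop over a reformulated zero-based recurrence q=(q+skip+1)%step that remembers the last step hitting offset 0.
import Mathlib
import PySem

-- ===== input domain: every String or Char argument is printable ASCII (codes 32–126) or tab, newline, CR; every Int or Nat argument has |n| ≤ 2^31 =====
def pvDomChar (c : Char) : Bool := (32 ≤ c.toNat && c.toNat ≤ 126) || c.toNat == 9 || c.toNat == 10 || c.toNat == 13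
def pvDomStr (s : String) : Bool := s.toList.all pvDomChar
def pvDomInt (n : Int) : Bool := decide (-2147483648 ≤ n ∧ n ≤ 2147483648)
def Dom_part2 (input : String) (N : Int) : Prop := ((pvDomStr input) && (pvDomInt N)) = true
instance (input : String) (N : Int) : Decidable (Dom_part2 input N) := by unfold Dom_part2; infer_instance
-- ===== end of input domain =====

-- B drops A's insertions table and backward scan: a single forward while-loop over the
-- zero-based recurrence q = (q + skip + 1) % step remembers the last step hitting offset 0
-- (objective: simpler, O(1) extra space). Both raise on unparsable input or N <= 0;
-- those inputs are outside Pre_part2.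

-- ===== PORT A =====
-- loop body of A's first (building) loop
def pvStepA (skip : Int) (st : Int × Array Int) (step : Int) : Int × Array Int :=
  let pos := PySem.Int.mod (st.1 + skip) step + 1
  (pos, st.2.push pos)  -- insertions.append(pos); Array.push is Python's O(1) list append

-- loop body of A's second (backward-scan) loop, with early return as an Option accumulator
-- insertions[step]: every step of range(N, 0, -1) satisfies 1 ≤ step ≤ N < len(insertions),
-- so ins[step.toNat]? = some _ is exactly Python's in-range indexing here
def pvScanA (ins : Array Int) (acc : Option Int) (step : Int) : Option Int :=
  match acc with
  | some r => some r
  | none => if ins[step.toNat]? = some 1 then some step else none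

def part2 (input : String) (N : Int) : Int :=
  match PySem.Int.ofStr? (PySem.Str.strip input) with
  | none => 0  -- int() raises ValueError: outside Pre_part2
  | some skip =>
    let st := (PySem.List.pyRange 1 (N + 1) 1).foldl (pvStepA skip) (0, #[0])
    ((PySem.List.pyRange N 0 (-1)).foldl (pvScanA st.2) none).getD 0
    -- none = the final `raise`: outside Pre_part2

-- ===== PORT B =====
-- B's while-loop as structural recursion: fuel = remaining iterations (N - step + 1),
-- state = (step, q, result); faithful to Source B's `while step <= N`
def pvLoopB (jump : Int) : Nat → Int → Int → Option Int → Option Int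
  | 0, _, _, result => result
  | fuel + 1, step, q, result =>
    let q' := PySem.Int.mod (q + jump) step
    pvLoopB jump fuel (step + 1) q' (if q' = 0 then some step else result)

def part2_alt (input : String) (N : Int) : Int :=
  match PySem.Int.ofStr? (PySem.Str.strip input) with
  | none => 0  -- int() raises ValueError: outside Pre_part2
  | some skip =>
    (pvLoopB (skip + 1) N.toNat 1 (-1) none).getD 0
    -- none = `result is None` → raise: outside Pre_part2

-- ===== PRECONDITION & SPEC =====
-- A (and B) raise ValueError when input does not parse as an int, and the final
-- Exception when N <= 0 (for N >= 1 step 1 always lands at position 1).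
def Pre_part2 (input : String) (N : Int) : Prop :=
  (PySem.Int.ofStr? (PySem.Str.strip input)).isSome ∧ 1 ≤ N
instance (input : String) (N : Int) : Decidable (Pre_part2 input N) := by
  unfold Pre_part2; infer_instance

def pvWitness_part2 : String × Int := ("3", 2017)

def Spec_part2 (input : String) (N : Int) (out : Int) : Prop := out = part2_alt input N
instance (input : String) (N : Int) (out : Int) : Decidable (Spec_part2 input N out) := by
  unfold Spec_part2; infer_instance

-- ===== CLAIM =====
def Claim_equal_part2 : Prop :=
  ∀ (input : String) (N : Int), Dom_part2 input N → Pre_part2 input N →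
    Spec_part2 input N (part2 input N)

-- ===== LEMMAS AND PROOFS =====

-- B's state transition, folded over a range (bridge between the while-loop recursion
-- and a list fold, used only by the proofs)
def pvStepQ (jump : Int) (st : Int × Option Int) (step : Int) : Int × Option Int :=
  let q' := PySem.Int.mod (st.1 + jump) step
  (q', if q' = 0 then some step else st.2)

theorem pvLoopB_eq_fold (jump : Int) (f : Nat) :
    ∀ (step q : Int) (res : Option Int),
      pvLoopB jump f step q res
        = ((PySem.List.pyRange step (step + f) 1).foldl (pvStepQ jump) (q, res)).2 := by
  induction f with
  | zero =>
    intro step q res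
    rw [PySem.List.pyRange_one_eq_nil (by omega)]
    rfl
  | succ f ih =>
    intro step q res
    rw [PySem.List.pyRange_one_cons (by omega)]
    have h : step + 1 + (f : Int) = step + ((f : Nat) + 1 : Nat) := by push_cast; ring
    simp only [List.foldl_cons, pvLoopB, pvStepQ, ih, h]

-- the early-return accumulator absorbs once it is `some`
theorem pvScanA_absorb (ins : Array Int) (r : Int) (l : List Int) :
    l.foldl (pvScanA ins) (some r) = some r := by
  induction l with
  | nil => rfl
  | cons x xs ih => simp [pvScanA, ih]

-- appending one element does not change the backward scan over indices ≤ n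
theorem pvScanA_snoc (ins : Array Int) (p : Int) (n : Nat) (hlen : ins.size = n + 1) :
    (PySem.List.pyRange (n : Int) 0 (-1)).foldl (pvScanA (ins.push p)) none
      = (PySem.List.pyRange (n : Int) 0 (-1)).foldl (pvScanA ins) none := by
  apply PySem.List.foldl_congr_mem
  intro acc x hx
  rcases PySem.List.mem_pyRange_neg_one.mp hx with ⟨h0, hn⟩
  have hxt : x.toNat < ins.size := by omega
  unfold pvScanA
  cases acc with
  | some r => rfl
  | none => rw [Array.getElem?_push_lt hxt, Array.getElem?_eq_getElem hxt]

-- main invariant: A's position is B's offset plus one, A's table has length n+1, and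
-- the backward scan of A's table equals B's running result
theorem pv_inv (skip : Int) (n : Nat) :
    ((PySem.List.pyRange 1 ((n : Int) + 1) 1).foldl (pvStepA skip) (0, #[0])).1
      = ((PySem.List.pyRange 1 ((n : Int) + 1) 1).foldl (pvStepQ (skip + 1)) (-1, none)).1 + 1
    ∧ ((PySem.List.pyRange 1 ((n : Int) + 1) 1).foldl (pvStepA skip) (0, #[0])).2.size = n + 1
    ∧ (PySem.List.pyRange (n : Int) 0 (-1)).foldl
        (pvScanA ((PySem.List.pyRange 1 ((n : Int) + 1) 1).foldl (pvStepA skip) (0, #[0])).2) none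
      = ((PySem.List.pyRange 1 ((n : Int) + 1) 1).foldl (pvStepQ (skip + 1)) (-1, none)).2 := by
  induction n with
  | zero =>
    rw [PySem.List.pyRange_one_eq_nil (by omega), PySem.List.pyRange_neg_one_eq_nil (by omega)]
    simp
  | succ n ih =>
    obtain ⟨ih1, ih2, ih3⟩ := ih
    set a := (PySem.List.pyRange 1 ((n : Int) + 1) 1).foldl (pvStepA skip) (0, #[0]) with ha
    set b := (PySem.List.pyRange 1 ((n : Int) + 1) 1).foldl (pvStepQ (skip + 1)) (-1, none) with hb
    have hrange : PySem.List.pyRange 1 ((((n : Nat) + 1 : Nat) : Int) + 1) 1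
        = PySem.List.pyRange 1 ((n : Int) + 1) 1 ++ [((n : Int) + 1)] := by
      push_cast
      exact PySem.List.pyRange_one_succ_right (by omega)
    have hcons : PySem.List.pyRange (((n : Nat) + 1 : Nat) : Int) 0 (-1)
        = ((n : Int) + 1) :: PySem.List.pyRange (n : Int) 0 (-1) := by
      push_cast
      rw [PySem.List.pyRange_neg_one_cons (by omega)]
      norm_num
    rw [hrange, hcons, List.foldl_append, List.foldl_append]
    simp only [List.foldl_cons, List.foldl_nil, ← ha, ← hb]
    have hq : PySem.Int.mod (b.1 + (skip + 1)) ((n : Int) + 1)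
        = PySem.Int.mod (a.1 + skip) ((n : Int) + 1) := by
      rw [ih1]; ring_nf
    have hget : (pvStepA skip a ((n : Int) + 1)).2[((n : Int) + 1).toNat]?
        = some (PySem.Int.mod (a.1 + skip) ((n : Int) + 1) + 1) := by
      have hlen : ((n : Int) + 1).toNat = a.2.size := by omega
      rw [hlen]
      simp [pvStepA]
    refine ⟨?_, by simp [pvStepA, ih2], ?_⟩
    · simp only [pvStepA, pvStepQ, hq]
    by_cases hp : PySem.Int.mod (a.1 + skip) ((n : Int) + 1) = 0
    · have hacc : pvScanA (pvStepA skip a ((n : Int) + 1)).2 none ((n : Int) + 1)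
          = some ((n : Int) + 1) := by
        simp only [pvScanA, hget, Option.some.injEq]
        rw [if_pos (by omega)]
      rw [hacc, pvScanA_absorb]
      simp only [pvStepQ, hq]
      rw [if_pos hp]
    · have hacc : pvScanA (pvStepA skip a ((n : Int) + 1)).2 none ((n : Int) + 1) = none := by
        simp only [pvScanA, hget, Option.some.injEq]
        rw [if_neg (by omega)]
      rw [hacc]
      have hsnoc : (pvStepA skip a ((n : Int) + 1)).2
          = a.2.push (PySem.Int.mod (a.1 + skip) ((n : Int) + 1) + 1) := by simp [pvStepA]
      rw [hsnoc, pvScanA_snoc a.2 _ n ih2, ih3]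
      simp only [pvStepQ, hq]
      rw [if_neg hp]

-- ===== VERDICT =====
theorem part2_spec : Claim_equal_part2 := by
  intro input N _ hpre
  obtain ⟨hparse, hN⟩ := hpre
  unfold Spec_part2 part2 part2_alt
  obtain ⟨skip, hs⟩ := Option.isSome_iff_exists.mp hparse
  rw [hs]
  have hNn : N = ((N.toNat : Nat) : Int) := by omega
  rw [hNn]
  dsimp only
  rw [pvLoopB_eq_fold]
  have h1 : (1 : Int) + ((((N.toNat : Int)).toNat : Nat) : Int) = (N.toNat : Int) + 1 := by
    omega
  rw [h1, (pv_inv skip N.toNat).2.2]
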